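-- pv_equiv track=rewrite | github.com/zochmaster/Zabawy_w_kryptoanalize | utils.py | format_with_spaces
-- ===== SOURCE A (Python) =====
-- ALPHABET = "ABCDEFGHIJKLMNOPQRSTUVWXYZ"
--
-- def format_with_spaces(original, processed):
--     result, idx = [], 0
--     for char in original:
--         if char.upper() in ALPHABET:
--             result.append(processed[idx])
--             idx += 1
--         else:
--             result.append(char)
--     return ''.join(result)
-- ===== SOURCE B (Python) =====
-- ALPHABET = "ABCDEFGHIJKLMNOPQRSTUVWXYZ"
--
-- def format_with_spaces(original, processed):
--     positions = [i for i, c in enumerate(original) if c.upper() in ALPHABET]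
--     result = list(original)
--     for rank, pos in enumerate(positions):
--         result[pos] = processed[rank]
--     return ''.join(result)
-- ===== Notes on version B (the rewrite author's own statement) =====
-- stated objective: alternative
-- what changed: Instead of one interleaved loop threading a manual index, B first computes the letter positions of the original and then overlays the processed characters onto a mutable copy by rank, a two-pass index-then-overlay decomposition.
import Mathlib
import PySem

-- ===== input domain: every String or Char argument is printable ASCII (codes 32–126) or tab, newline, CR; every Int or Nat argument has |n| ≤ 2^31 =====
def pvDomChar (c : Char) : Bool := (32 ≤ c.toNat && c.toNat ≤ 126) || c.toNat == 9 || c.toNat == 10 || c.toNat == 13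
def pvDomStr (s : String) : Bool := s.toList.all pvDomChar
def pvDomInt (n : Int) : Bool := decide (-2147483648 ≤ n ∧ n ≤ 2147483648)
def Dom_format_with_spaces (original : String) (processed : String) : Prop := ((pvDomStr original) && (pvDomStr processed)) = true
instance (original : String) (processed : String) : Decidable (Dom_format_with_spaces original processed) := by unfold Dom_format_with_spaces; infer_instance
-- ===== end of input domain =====

-- B re-decomposes A's single index-threading loop into two passes (collect letter
-- positions, then overlay processed characters by rank); same cost, no speed claim.

-- ===== PORT A =====
def pvAlphabet : List Char := "ABCDEFGHIJKLMNOPQRSTUVWXYZ".toList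

-- char.upper() in ALPHABET for a single char (ASCII domain): exact via PySem.Chars.upperChar
def pvIsLetter (c : Char) : Bool := pvAlphabet.contains (PySem.Chars.upperChar c)

-- processed[idx] is PySem.List.pyGetD with default ' '; Pre_ keeps idx in range (Python raises IndexError otherwise)
def format_with_spaces (original : String) (processed : String) : String :=
  let p := processed.toList
  let st := original.toList.foldl
    (fun (st : List Char × Int) char =>
      if pvIsLetter char then (st.1 ++ [PySem.List.pyGetD p st.2 ' '], st.2 + 1)
      else (st.1 ++ [char], st.2))
    ([], 0)
  String.mk st.1

-- ===== PORT B =====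
def format_with_spaces_alt (original : String) (processed : String) : String :=
  let o := original.toList
  let positions : List Int :=
    (PySem.List.enumerate o 0).filterMap (fun ic => if pvIsLetter ic.2 then some ic.1 else none)
  let result :=
    (PySem.List.enumerate positions 0).foldl
      (fun r rp => PySem.List.pySetD r rp.2 (PySem.List.pyGetD processed.toList rp.1 ' ')) o
  String.mk result

-- ===== PRECONDITION & SPEC =====
-- Pre_ excludes exactly the inputs where Python A raises IndexError: fewer processed
-- characters than letters in original (B's Python raises there too).
def Pre_format_with_spaces (original : String) (processed : String) : Prop :=
  original.toList.countP pvIsLetter ≤ processed.toList.length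
instance (original : String) (processed : String) : Decidable (Pre_format_with_spaces original processed) := by unfold Pre_format_with_spaces; infer_instance

def pvWitness_format_with_spaces : String × String := ("ab, c!", "XYZ")

def Spec_format_with_spaces (original : String) (processed : String) (out : String) : Prop := out = format_with_spaces_alt original processed
instance (original : String) (processed : String) (out : String) : Decidable (Spec_format_with_spaces original processed out) := by unfold Spec_format_with_spaces; infer_instance

-- ===== CLAIM (what is proved, stated in full; the proofs are below) =====
def Claim_equal_format_with_spaces : Prop := ∀ (original : String) (processed : String), Dom_format_with_spaces original processed → Pre_format_with_spaces original processed → Spec_format_with_spaces original processed (format_with_spaces original processed)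

-- ===== LEMMAS AND PROOFS =====

-- common straight-line recursion both ports are reduced to
def pvRun (p : List Char) : List Char → Int → List Char
  | [], _ => []
  | c :: cs, idx =>
      if pvIsLetter c then PySem.List.pyGetD p idx ' ' :: pvRun p cs (idx + 1)
      else c :: pvRun p cs idx

lemma pvAloop (p : List Char) (o : List Char) : ∀ (res : List Char) (idx : Int),
    o.foldl (fun (st : List Char × Int) char =>
      if pvIsLetter char then (st.1 ++ [PySem.List.pyGetD p st.2 ' '], st.2 + 1)
      else (st.1 ++ [char], st.2)) (res, idx)
    = (res ++ pvRun p o idx, idx + (o.countP pvIsLetter : Int)) := by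
  induction o with
  | nil => simp [pvRun]
  | cons c cs ih =>
      intro res idx
      by_cases h : pvIsLetter c = true
      · simp [pvRun, h, ih]
        omega
      · simp [pvRun, h, ih]

def pvPositions (o : List Char) (s : Int) : List Int :=
  (PySem.List.enumerate o s).filterMap (fun ic => if pvIsLetter ic.2 then some ic.1 else none)

lemma pvPositions_cons (c : Char) (cs : List Char) (s : Int) :
    pvPositions (c :: cs) s
      = (if pvIsLetter c then [s] else []) ++ pvPositions cs (s + 1) := by
  by_cases h : pvIsLetter c = true <;>
    simp [pvPositions, PySem.List.enumerate_cons, h]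

lemma pvBloop (p : List Char) (o : List Char) : ∀ (pre : List Char) (r : Int),
    (PySem.List.enumerate (pvPositions o (pre.length : Int)) r).foldl
      (fun l rp => PySem.List.pySetD l rp.2 (PySem.List.pyGetD p rp.1 ' ')) (pre ++ o)
    = pre ++ pvRun p o r := by
  induction o with
  | nil => simp [pvPositions, pvRun, PySem.List.enumerate_nil]
  | cons c cs ih =>
      intro pre r
      rw [pvPositions_cons]
      by_cases h : pvIsLetter c = true
      · have hset : PySem.List.pySetD (pre ++ c :: cs) ((pre.length : Nat) : Int)
            (PySem.List.pyGetD p r ' ') = pre ++ PySem.List.pyGetD p r ' ' :: cs := by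
          rw [PySem.List.pySetD_natCast]
          rw [List.set_append_right _ _ (Nat.le_refl _)]
          simp
        have ih' := ih (pre ++ [PySem.List.pyGetD p r ' ']) (r + 1)
        simp only [List.length_append, List.length_cons, List.length_nil, Nat.cast_add,
          Nat.cast_one, zero_add, List.append_assoc, List.cons_append,
          List.nil_append] at ih'
        simp only [h, if_pos, List.cons_append, List.nil_append,
          PySem.List.enumerate_cons, List.foldl_cons, hset, pvRun]
        rw [ih']
      · have ih' := ih (pre ++ [c]) r
        simp only [List.length_append, List.length_cons, List.length_nil, Nat.cast_add,
          Nat.cast_one, zero_add, List.append_assoc, List.cons_append,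
          List.nil_append] at ih'
        simp only [h, if_neg, Bool.false_eq_true, not_false_iff, List.nil_append]
        rw [ih']
        simp [pvRun, h]

-- ===== VERDICT (by name: the statement is the Claim_ definition above) =====
theorem format_with_spaces_spec : Claim_equal_format_with_spaces := by
  intro original processed _ _
  unfold Spec_format_with_spaces format_with_spaces format_with_spaces_alt
  have hA := pvAloop processed.toList original.toList [] 0
  have hB := pvBloop processed.toList original.toList [] 0
  simp only [List.nil_append, List.length_nil, Nat.cast_zero] at hA hB
  simp only [hA]
  simp only [pvPositions] at hB
  simp [hB]
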